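-- pv_equiv track=rewrite | github.com/vinamra57/gitstory | src/gitstory/parser/branch_comparator.py | _analyze_file_changes
-- ===== SOURCE A (Python) =====
-- from typing import List, Dict
--
-- def _analyze_file_changes(
--     base_commits: List[Dict], compare_commits: List[Dict]
-- ) -> Dict:
--     """Analyze file changes to identify unique and shared files."""
--     # Collect all files changed in each branch
--     base_files = set()
--     for commit in base_commits:
--         base_files.update(commit.get("files_changed", []))
--
--     compare_files = set()
--     for commit in compare_commits:
--         compare_files.update(commit.get("files_changed", []))
--
--     # Identify unique and shared files
--     base_only_files = list(base_files - compare_files)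
--     compare_only_files = list(compare_files - base_files)
--     shared_files = list(base_files & compare_files)
--
--     return {
--         "base_only_files": sorted(base_only_files),
--         "compare_only_files": sorted(compare_only_files),
--         "shared_files": sorted(shared_files),  # Conflict risk
--     }
-- ===== SOURCE B (Python) =====
-- from typing import List, Dict
--
-- def _analyze_file_changes(
--     base_commits: List[Dict], compare_commits: List[Dict]
-- ) -> Dict:
--     """Single flag-map build plus one bucketing pass instead of three set operations."""
--     flags = {}
--     for commit in base_commits:
--         for f in commit.get("files_changed", []):
--             flags[f] = (True, False)
--     for commit in compare_commits:
--         for f in commit.get("files_changed", []):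
--             in_base = flags[f][0] if f in flags else False
--             flags[f] = (in_base, True)
--     base_only, compare_only, shared = [], [], []
--     for f, (in_base, in_compare) in flags.items():
--         if in_base and in_compare:
--             shared.append(f)
--         elif in_base:
--             base_only.append(f)
--         else:
--             compare_only.append(f)
--     return {
--         "base_only_files": sorted(base_only),
--         "compare_only_files": sorted(compare_only),
--         "shared_files": sorted(shared),
--     }
-- ===== Notes on version B (the rewrite author's own statement) =====
-- stated objective: alternative
-- what changed: Replaces A's two sets and three set-difference/intersection operations with one filename->(in_base,in_compare) flag map built in two loops plus a single bucketing pass over its items that appends each file to base_only, compare_only or shared.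
import Mathlib
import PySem

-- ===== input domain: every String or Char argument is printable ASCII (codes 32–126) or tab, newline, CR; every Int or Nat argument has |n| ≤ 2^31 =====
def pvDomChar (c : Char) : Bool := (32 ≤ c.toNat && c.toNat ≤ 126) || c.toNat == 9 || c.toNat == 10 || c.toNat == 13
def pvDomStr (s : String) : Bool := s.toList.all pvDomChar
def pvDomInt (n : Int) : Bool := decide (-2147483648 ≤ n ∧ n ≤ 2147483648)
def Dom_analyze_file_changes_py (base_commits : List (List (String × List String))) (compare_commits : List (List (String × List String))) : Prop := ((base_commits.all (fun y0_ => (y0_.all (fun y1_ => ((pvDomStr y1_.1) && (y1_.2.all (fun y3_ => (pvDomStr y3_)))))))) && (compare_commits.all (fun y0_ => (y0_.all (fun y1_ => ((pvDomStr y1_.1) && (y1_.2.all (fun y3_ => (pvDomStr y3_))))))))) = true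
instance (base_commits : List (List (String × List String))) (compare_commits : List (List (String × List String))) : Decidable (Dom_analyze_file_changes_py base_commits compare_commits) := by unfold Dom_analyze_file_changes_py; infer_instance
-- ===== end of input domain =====

-- B replaces A's three set-difference/intersection operations by one filename→(in_base, in_compare) flag map
-- built in two loops plus a single bucketing pass over its items (objective: alternative; same value, return-value equivalence).

-- ===== PORT A =====
def analyze_file_changes_py (base_commits : List (List (String × List String))) (compare_commits : List (List (String × List String))) : List (String × List String) :=
  let base_files : PySem.Set String :=
    base_commits.foldl (fun s commit => PySem.Set.update s ((PySem.Dict.mk commit).getD "files_changed" [])) PySem.Set.empty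
  let compare_files : PySem.Set String :=
    compare_commits.foldl (fun s commit => PySem.Set.update s ((PySem.Dict.mk commit).getD "files_changed" [])) PySem.Set.empty
  let base_only_files : List String := PySem.Set.diff base_files compare_files
  let compare_only_files : List String := PySem.Set.diff compare_files base_files
  let shared_files : List String := PySem.Set.inter base_files compare_files
  [("base_only_files", PySem.List.sorted base_only_files (fun x => x) false),
   ("compare_only_files", PySem.List.sorted compare_only_files (fun x => x) false),
   ("shared_files", PySem.List.sorted shared_files (fun x => x) false)]

-- ===== PORT B =====
def analyze_file_changes_py_alt (base_commits : List (List (String × List String))) (compare_commits : List (List (String × List String))) : List (String × List String) :=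
  let d0 : PySem.Dict String (Bool × Bool) :=
    base_commits.foldl (fun d commit =>
      ((PySem.Dict.mk commit).getD "files_changed" []).foldl (fun d f => d.insert f (true, false)) d)
      PySem.Dict.empty
  let d1 : PySem.Dict String (Bool × Bool) :=
    compare_commits.foldl (fun d commit =>
      ((PySem.Dict.mk commit).getD "files_changed" []).foldl (fun d f =>
        d.insert f ((if d.contains f then (d.getD f (false, false)).1 else false), true)) d)
      d0
  let buckets : List String × List String × List String :=
    d1.items.foldl (fun acc p =>
      if p.2.1 && p.2.2 then (acc.1, acc.2.1, acc.2.2 ++ [p.1])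
      else if p.2.1 then (acc.1 ++ [p.1], acc.2.1, acc.2.2)
      else (acc.1, acc.2.1 ++ [p.1], acc.2.2)) ([], [], [])
  [("base_only_files", PySem.List.sorted buckets.1 (fun x => x) false),
   ("compare_only_files", PySem.List.sorted buckets.2.1 (fun x => x) false),
   ("shared_files", PySem.List.sorted buckets.2.2 (fun x => x) false)]

-- ===== PRECONDITION & SPEC =====
def Spec_analyze_file_changes_py (base_commits : List (List (String × List String))) (compare_commits : List (List (String × List String))) (out : List (String × List String)) : Prop := out = analyze_file_changes_py_alt base_commits compare_commits
instance (base_commits : List (List (String × List String))) (compare_commits : List (List (String × List String))) (out : List (String × List String)) : Decidable (Spec_analyze_file_changes_py base_commits compare_commits out) := by unfold Spec_analyze_file_changes_py; infer_instance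

-- ===== CLAIM (what is proved, stated in full; the proofs are below) =====
def Claim_equal_analyze_file_changes_py : Prop := ∀ (base_commits : List (List (String × List String))) (compare_commits : List (List (String × List String))), Dom_analyze_file_changes_py base_commits compare_commits → Spec_analyze_file_changes_py base_commits compare_commits (analyze_file_changes_py base_commits compare_commits)

-- ===== LEMMAS AND PROOFS =====

-- the flattened file lists of each side
def pvFiles (commits : List (List (String × List String))) : List String :=
  commits.flatMap (fun commit => (PySem.Dict.mk commit).getD "files_changed" [])

theorem foldl_update_flatten (l : List (List (String × List String))) (s : PySem.Set String) :
    l.foldl (fun s commit => PySem.Set.update s ((PySem.Dict.mk commit).getD "files_changed" [])) s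
      = PySem.Set.update s (pvFiles l) := by
  induction l generalizing s with
  | nil => simp [pvFiles, PySem.Set.update]
  | cons c l ih => simp only [List.foldl_cons, ih, pvFiles, List.flatMap_cons, PySem.Set.update_append]

theorem foldl_dict_flatten {σ : Type} (l : List (List (String × List String))) (F : σ → String → σ) (d : σ) :
    l.foldl (fun d commit => ((PySem.Dict.mk commit).getD "files_changed" []).foldl F d) d
      = (pvFiles l).foldl F d := by
  induction l generalizing d with
  | nil => simp [pvFiles]
  | cons c l ih => simp only [List.foldl_cons, ih, pvFiles, List.flatMap_cons, List.foldl_append]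

theorem get?_loop1 (l : List String) (d : PySem.Dict String (Bool × Bool)) (x : String) :
    (l.foldl (fun d f => d.insert f (true, false)) d).get? x
      = if x ∈ l then some (true, false) else d.get? x := by
  induction l generalizing d with
  | nil => simp
  | cons f l ih =>
    simp only [List.foldl_cons, ih, List.mem_cons]
    by_cases hx : x ∈ l
    · simp [hx]
    · by_cases hf : x = f <;> simp [hx, hf, PySem.Dict.get?_insert_self, PySem.Dict.get?_insert_of_ne]

-- invariant: the stored "in base" flag (default false) is exactly membership in the base file list
def pvInv (B : List String) (d : PySem.Dict String (Bool × Bool)) : Prop :=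
  ∀ x, (d.getD x (false, false)).1 = decide (x ∈ B)

theorem get?_loop2 (B : List String) (l : List String) (d : PySem.Dict String (Bool × Bool))
    (hInv : pvInv B d) (x : String) :
    (l.foldl (fun d f =>
        d.insert f ((if d.contains f then (d.getD f (false, false)).1 else false), true)) d).get? x
      = if x ∈ l then some (decide (x ∈ B), true) else d.get? x := by
  induction l generalizing d with
  | nil => simp
  | cons f l ih =>
    have hval : (if d.contains f then (d.getD f (false, false)).1 else false) = decide (f ∈ B) := by
      by_cases hc : d.contains f
      · rw [if_pos hc]; exact hInv f
      · have hc' : d.contains f = false := by simpa using hc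
        have h0 := hInv f
        simp [PySem.Dict.getD_of_not_contains, hc'] at h0
        simp [hc', h0]
    have hInv' : pvInv B (d.insert f ((if d.contains f then (d.getD f (false, false)).1 else false), true)) := by
      intro x'
      rw [PySem.Dict.getD_insert]
      split
      · simp [*]
      · exact hInv x'
    simp only [List.foldl_cons, ih _ hInv']
    by_cases hx : x ∈ l
    · simp [hx]
    · by_cases hf : x = f
      · subst hf
        simp [hx, PySem.Dict.get?_insert_self, hval]
      · simp [hx, hf, PySem.Dict.get?_insert_of_ne]

theorem foldl_buckets (l : List (String × (Bool × Bool))) (a b c : List String) :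
    l.foldl (fun acc p =>
      if p.2.1 && p.2.2 then (acc.1, acc.2.1, acc.2.2 ++ [p.1])
      else if p.2.1 then (acc.1 ++ [p.1], acc.2.1, acc.2.2)
      else (acc.1, acc.2.1 ++ [p.1], acc.2.2)) ((a, b, c) : List String × List String × List String)
      = (a ++ (l.filter (fun p => p.2.1 && !p.2.2)).map (·.1),
         b ++ (l.filter (fun p => !p.2.1)).map (·.1),
         c ++ (l.filter (fun p => p.2.1 && p.2.2)).map (·.1)) := by
  induction l generalizing a b c with
  | nil => simp
  | cons p l ih =>
    obtain ⟨k, fb, fc⟩ := p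
    rw [List.foldl_cons]
    cases fb <;> cases fc
    · exact (ih a (b ++ [k]) c).trans (by simp)
    · exact (ih a (b ++ [k]) c).trans (by simp)
    · exact (ih (a ++ [k]) b c).trans (by simp)
    · exact (ih a b (c ++ [k])).trans (by simp)

-- sorted lists with the same distinct members are equal
theorem sorted_eq_of_nodup_of_mem_iff (xs ys : List String)
    (hx : xs.Nodup) (hy : ys.Nodup) (h : ∀ a, a ∈ xs ↔ a ∈ ys) :
    PySem.List.sorted xs (fun x => x) false = PySem.List.sorted ys (fun x => x) false := by
  exact PySem.List.sorted_eq_sorted_of_perm xs ys (fun x => x) (fun a b h => h)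
    ((List.perm_ext_iff_of_nodup hx hy).mpr h)

-- ===== VERDICT (by name: the statement is the Claim_ definition above) =====
theorem analyze_file_changes_py_spec : Claim_equal_analyze_file_changes_py := by
  intro bc cc _
  unfold Spec_analyze_file_changes_py analyze_file_changes_py analyze_file_changes_py_alt
  simp only []
  -- A side sets
  rw [foldl_update_flatten, foldl_update_flatten]
  -- B side dicts flattened
  rw [foldl_dict_flatten, foldl_dict_flatten]
  set Bf := pvFiles bc with hBf
  set Cf := pvFiles cc with hCf
  set d0 := Bf.foldl (fun d f => d.insert f (true, false)) PySem.Dict.empty with hd0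
  set d1 := Cf.foldl (fun d f =>
      d.insert f ((if d.contains f then (d.getD f (false, false)).1 else false), true)) d0 with hd1
  have hget0 : ∀ x, d0.get? x = if x ∈ Bf then some (true, false) else none := by
    intro x; rw [hd0, get?_loop1]; simp
  have hinv0 : pvInv Bf d0 := by
    intro x
    rw [PySem.Dict.getD_eq_get?_getD, hget0 x]
    by_cases hx : x ∈ Bf <;> simp [hx]
  have hget1 : ∀ x, d1.get? x = if x ∈ Cf then some (decide (x ∈ Bf), true)
      else if x ∈ Bf then some (true, false) else none := by
    intro x; rw [hd1, get?_loop2 Bf Cf d0 hinv0, hget0]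
  have hk0 : d0.keys = PySem.Set.ofList Bf := by
    rw [hd0, PySem.Dict.keys_foldl_insert]
    simp [PySem.Dict.keys_empty]
    rfl
  have hk1 : d1.keys = PySem.Set.update (PySem.Set.ofList Bf) Cf := by
    rw [hd1, PySem.Dict.keys_foldl_insert, hk0]
  have hnd1 : d1.keys.Nodup := by
    rw [hk1]; exact PySem.Set.nodup_update _ _ (PySem.Set.nodup_ofList _)
  have hmemk : ∀ x, x ∈ d1.keys ↔ x ∈ Bf ∨ x ∈ Cf := by
    intro x; rw [hk1]; simp [PySem.Set.mem_update, PySem.Set.mem_ofList]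
  have hitems : d1.items = d1.keys.map (fun k => (k, d1.getD k (false, false))) :=
    PySem.Dict.items_eq_map_keys d1 hnd1 (false, false)
  rw [hitems, foldl_buckets]
  simp only [List.nil_append, List.filter_map, List.map_map]
  have hflag : ∀ k, d1.getD k (false, false) =
      if k ∈ Cf then (decide (k ∈ Bf), true) else if k ∈ Bf then (true, false) else (false, false) := by
    intro k
    rw [PySem.Dict.getD_eq_get?_getD, hget1 k]
    by_cases h1 : k ∈ Cf <;> by_cases h2 : k ∈ Bf <;> simp [h1, h2]
  have hcomp : ((fun (x : String × (Bool × Bool)) => x.1) ∘ fun k => (k, d1.getD k (false, false))) = fun k => k := rfl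
  rw [hcomp]
  simp only [List.map_id_fun', id]
  have hofB : PySem.Set.update PySem.Set.empty Bf = PySem.Set.ofList Bf := rfl
  have hofC : PySem.Set.update PySem.Set.empty Cf = PySem.Set.ofList Cf := rfl
  rw [hofB, hofC]
  have hndB := PySem.Set.nodup_ofList Bf
  have hndC := PySem.Set.nodup_ofList Cf
  congr 1
  · -- base_only
    congr 1
    apply sorted_eq_of_nodup_of_mem_iff
    · exact PySem.Set.nodup_diff _ _ hndB
    · exact hnd1.filter _
    · intro a
      by_cases h1 : a ∈ pvFiles bc <;> by_cases h2 : a ∈ pvFiles cc <;>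
        simp [PySem.Set.mem_diff, PySem.Set.mem_ofList, List.mem_filter, hmemk, hflag, h1, h2, hBf, hCf]
  congr 1
  · -- compare_only
    congr 1
    apply sorted_eq_of_nodup_of_mem_iff
    · exact PySem.Set.nodup_diff _ _ hndC
    · exact hnd1.filter _
    · intro a
      by_cases h1 : a ∈ pvFiles bc <;> by_cases h2 : a ∈ pvFiles cc <;>
        simp [PySem.Set.mem_diff, PySem.Set.mem_ofList, List.mem_filter, hmemk, hflag, h1, h2, hBf, hCf]
  -- shared
  congr 1
  congr 1
  apply sorted_eq_of_nodup_of_mem_iff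
  · exact PySem.Set.nodup_inter _ _ hndB
  · exact hnd1.filter _
  · intro a
    by_cases h1 : a ∈ pvFiles bc <;> by_cases h2 : a ∈ pvFiles cc <;>
      simp [PySem.Set.mem_inter, PySem.Set.mem_ofList, List.mem_filter, hmemk, hflag, h1, h2, hBf, hCf]
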